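-- pv_equiv track=rewrite | github.com/aditya-s3n/FileIO_ICS4U | sun_data_structures.py | time_series_analysis
-- ===== SOURCE A (Python) =====
-- def time_series_analysis(sun_spot_list, flare_dict):
--     sunspot_flare_dict = {}
--
--     for day in sun_spot_list:
--         date = day[0]
--         num_sunspots = day[1]
--
--         if date in flare_dict:
--             flare_day = flare_dict[date]
--             peak_flare_energy = 0
--             for flares in flare_day:
--                 high_flare_energy = flares[0][1]
--
--                 if high_flare_energy > peak_flare_energy:
--                     peak_flare_energy = high_flare_energy
--
--             sunspot_flare_dict[date] = (num_sunspots, peak_flare_energy)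
--
--     return sunspot_flare_dict
-- ===== SOURCE B (Python) =====
-- def time_series_analysis(sun_spot_list, flare_dict):
--     # Pass 1: precompute each flare date's peak energy once (empty flare
--     # records are skipped; A raises IndexError on those when the date is used).
--     peaks = {}
--     for date, flares in flare_dict.items():
--         peaks[date] = max([f[0][1] for f in flares if f] + [0])
--     # Pass 2: join the sunspot series against the precomputed index.
--     result = {}
--     for date, n in sun_spot_list:
--         if date in peaks:
--             result[date] = (n, peaks[date])
--     return result
-- ===== Notes on version B (the rewrite author's own statement) =====
-- stated objective: alternative
-- what changed: A's on-demand nested scan (for every sunspot row it re-scans that date's flare list with a running max) is replaced by a staged join: pass 1 builds a peaks index over flare_dict so each flare list is scanned exactly once, pass 2 walks the sunspot series doing only O(1) lookups into that index.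
-- crash fix: On inputs where some sunspot date's flare_dict entry contains an empty flare record, A raises IndexError (flares[0]); B skips empty records and returns the peak of the remaining ones (0 if none). — e.g. on time_series_analysis([("a", 1)], [("a", [[]])]): A raises IndexError, B returns [("a", (1, 0))]
import Mathlib
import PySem

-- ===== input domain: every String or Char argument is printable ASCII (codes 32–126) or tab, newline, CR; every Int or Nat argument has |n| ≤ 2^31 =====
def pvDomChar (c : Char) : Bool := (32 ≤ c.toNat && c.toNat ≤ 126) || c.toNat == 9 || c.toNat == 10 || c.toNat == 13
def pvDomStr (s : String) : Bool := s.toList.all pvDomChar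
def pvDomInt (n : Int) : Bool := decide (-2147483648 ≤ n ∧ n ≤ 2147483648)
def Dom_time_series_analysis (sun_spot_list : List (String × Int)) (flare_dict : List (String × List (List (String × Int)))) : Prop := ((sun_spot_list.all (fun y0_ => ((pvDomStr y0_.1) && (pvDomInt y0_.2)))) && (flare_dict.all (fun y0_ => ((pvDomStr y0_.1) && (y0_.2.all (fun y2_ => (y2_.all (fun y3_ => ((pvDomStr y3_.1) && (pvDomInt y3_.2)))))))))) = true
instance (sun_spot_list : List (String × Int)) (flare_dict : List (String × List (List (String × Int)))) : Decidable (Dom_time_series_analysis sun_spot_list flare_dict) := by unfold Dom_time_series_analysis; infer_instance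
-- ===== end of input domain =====

-- B replaces A's on-demand nested scan by a staged join: pass 1 precomputes a peaks
-- index over flare_dict (each flare list scanned once), pass 2 joins the sunspot
-- series against it with O(1) lookups. Equivalence proved on Pre_ (flare_dict keys
-- distinct — it is a Python dict — and no empty flare record behind a sunspot date,
-- where A raises IndexError while B skips it: see Raises_).


-- ===== PORT A =====
-- 'date in flare_dict' / 'flare_dict[date]' : first-match lookup in the association list
def pvFlares? (flare_dict : List (String × List (List (String × Int)))) (k : String) : Option (List (List (String × Int))) :=
  (flare_dict.find? (fun p => p.1 == k)).map (·.2)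

-- literal port of A: one pass over sun_spot_list, running max per matched date, dict insert
def time_series_analysis (sun_spot_list : List (String × Int)) (flare_dict : List (String × List (List (String × Int)))) : List (String × Int × Int) :=
  (sun_spot_list.foldl (fun (d : PySem.Dict String (Int × Int)) day =>
      match pvFlares? flare_dict day.1 with
      | some flare_day =>
          d.insert day.1 (day.2, flare_day.foldl (fun peak flares =>
            match PySem.List.pyGet? flares 0 with
            | some hf => if hf.2 > peak then hf.2 else peak
            | none => peak) 0)   -- 'none' is IndexError in Python, excluded by Pre_
      | none => d) PySem.Dict.empty).items

-- ===== PORT B =====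
-- literal port of B: pass 1 builds peaks over flare_dict.items()
-- ('for f in flares if f' = filter nonempty; f[0][1] via pyGet?, some since f is nonempty);
-- pass 2 folds over sun_spot_list with a lookup into peaks
def time_series_analysis_alt (sun_spot_list : List (String × Int)) (flare_dict : List (String × List (List (String × Int)))) : List (String × Int × Int) :=
  let peaks : PySem.Dict String Int := flare_dict.foldl (fun d p =>
      d.insert p.1 ((PySem.List.max?
        (((p.2.filter (fun f => !f.isEmpty)).map (fun f => ((PySem.List.pyGet? f 0).map Prod.snd).getD 0)) ++ [(0 : Int)])
        (fun y => y)).getD 0)) PySem.Dict.empty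
  (sun_spot_list.foldl (fun (r : PySem.Dict String (Int × Int)) day =>
      match peaks.get? day.1 with
      | some pk => r.insert day.1 (day.2, pk)
      | none => r) PySem.Dict.empty).items

-- ===== PRECONDITION & SPEC =====
-- Pre_ requires (a) distinct flare_dict keys — flare_dict is a Python dict, so a duplicate-key
-- association list represents no Python input — and (b) no empty flare record behind a date of
-- sun_spot_list: exactly there A raises IndexError (flares[0]).
def Pre_time_series_analysis (sun_spot_list : List (String × Int)) (flare_dict : List (String × List (List (String × Int)))) : Prop :=
  (flare_dict.map Prod.fst).Nodup ∧
  ∀ day ∈ sun_spot_list, ((pvFlares? flare_dict day.1).getD []).all (fun f => !f.isEmpty) = true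
instance (sun_spot_list : List (String × Int)) (flare_dict : List (String × List (List (String × Int)))) : Decidable (Pre_time_series_analysis sun_spot_list flare_dict) := by unfold Pre_time_series_analysis; infer_instance

def pvWitness_time_series_analysis : (List (String × Int)) × (List (String × List (List (String × Int)))) :=
  ([("a", 3), ("b", 1)], [("a", [[("x", 5)], [("y", 2)]])])

-- On inputs with an empty flare record behind a sunspot date A raises IndexError; B skips empty records and returns the peak of the rest (0 if none).
def Raises_time_series_analysis (sun_spot_list : List (String × Int)) (flare_dict : List (String × List (List (String × Int)))) : Prop :=
  ∃ day ∈ sun_spot_list, ¬ ((pvFlares? flare_dict day.1).getD []).all (fun f => !f.isEmpty) = true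
instance (sun_spot_list : List (String × Int)) (flare_dict : List (String × List (List (String × Int)))) : Decidable (Raises_time_series_analysis sun_spot_list flare_dict) := by unfold Raises_time_series_analysis; infer_instance
def pvRaiseWitness_time_series_analysis : (List (String × Int)) × (List (String × List (List (String × Int)))) :=
  ([("a", 1)], [("a", [[]])])
def pvRaiseWitnessOut_time_series_analysis : List (String × Int × Int) := [("a", (1, 0))]

def Spec_time_series_analysis (sun_spot_list : List (String × Int)) (flare_dict : List (String × List (List (String × Int)))) (out : List (String × Int × Int)) : Prop := out = time_series_analysis_alt sun_spot_list flare_dict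
instance (sun_spot_list : List (String × Int)) (flare_dict : List (String × List (List (String × Int)))) (out : List (String × Int × Int)) : Decidable (Spec_time_series_analysis sun_spot_list flare_dict out) := by unfold Spec_time_series_analysis; infer_instance

-- ===== CLAIM (what is proved, stated in full; the proofs are below) =====
def Claim_equal_time_series_analysis : Prop := ∀ (sun_spot_list : List (String × Int)) (flare_dict : List (String × List (List (String × Int)))), Dom_time_series_analysis sun_spot_list flare_dict → Pre_time_series_analysis sun_spot_list flare_dict → Spec_time_series_analysis sun_spot_list flare_dict (time_series_analysis sun_spot_list flare_dict)
def Claim_raises_time_series_analysis : Prop := (∀ (sun_spot_list : List (String × Int)) (flare_dict : List (String × List (List (String × Int)))), Dom_time_series_analysis sun_spot_list flare_dict → Raises_time_series_analysis sun_spot_list flare_dict → ¬ Pre_time_series_analysis sun_spot_list flare_dict) ∧ (Dom_time_series_analysis (pvRaiseWitness_time_series_analysis.1) (pvRaiseWitness_time_series_analysis.2) ∧ Raises_time_series_analysis (pvRaiseWitness_time_series_analysis.1) (pvRaiseWitness_time_series_analysis.2) ∧ time_series_analysis_alt (pvRaiseWitness_time_series_analysis.1) (pvRaiseWitness_time_series_analysis.2)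 = pvRaiseWitnessOut_time_series_analysis)

-- ===== LEMMAS AND PROOFS =====
-- get? after a fold of inserts = value of the LAST matching element
lemma pv_get?_foldl_insert {β V : Type} (key : β → String) (v : β → V) (l : List β)
    (d : PySem.Dict String V) (c : String) :
    (l.foldl (fun d x => d.insert (key x) (v x)) d).get? c =
      match l.reverse.find? (fun x => key x == c) with
      | some x => some (v x)
      | none => d.get? c := by
  induction l generalizing d with
  | nil => simp
  | cons x t ih =>
    simp only [List.foldl_cons, List.reverse_cons, List.find?_append]
    rw [ih]
    cases h : t.reverse.find? (fun x => key x == c) with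
    | some y => simp [Option.or]
    | none =>
      simp only [Option.none_or]
      cases hx : (key x == c) with
      | true =>
        simp only [List.find?_cons, hx]
        rw [PySem.Dict.get?_insert]
        simp [(beq_iff_eq).mp hx]
      | false =>
        simp only [List.find?_cons, hx, List.find?_nil]
        rw [PySem.Dict.get?_insert]
        have : c ≠ key x := fun hc => by simp [hc] at hx
        simp [this]

-- with distinct keys, last match = first match
lemma pv_find?_reverse_nodup {V : Type} (L : List (String × V)) (c : String)
    (h : (L.map Prod.fst).Nodup) :
    L.reverse.find? (fun p => p.1 == c) = L.find? (fun p => p.1 == c) := by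
  induction L with
  | nil => rfl
  | cons x t ih =>
    simp only [List.map_cons, List.nodup_cons] at h
    simp only [List.reverse_cons, List.find?_append]
    cases hx : (x.1 == c) with
    | true =>
      have hc : x.1 = c := beq_iff_eq.mp hx
      have hnone : t.reverse.find? (fun p => p.1 == c) = none := by
        rw [List.find?_eq_none]
        intro p hp
        have : p.1 ∈ t.map Prod.fst := List.mem_map_of_mem (List.mem_reverse.mp hp)
        simp only [beq_iff_eq]
        intro hpc
        rw [hpc, ← hc] at this
        exact h.1 this
      rw [hnone]
      simp only [Option.none_or, List.find?_cons, hx]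
    | false =>
      rw [ih h.2]
      simp only [List.find?_cons, hx, List.find?_nil]
      cases t.find? (fun p => p.1 == c) <;> simp [Option.or]

-- max(L + [0]) = running max from 0
lemma pv_max_append_zero (L : List Int) :
    (PySem.List.max? (L ++ [(0 : Int)]) (fun y => y)).getD 0 = L.foldl (fun m x => max m x) 0 := by
  cases L with
  | nil => decide
  | cons a t =>
    rw [List.cons_append, PySem.List.max?_id_cons, Option.getD_some, List.foldl_append]
    simp only [List.foldl_cons, List.foldl_nil]
    induction t generalizing a with
    | nil => exact max_comm a 0
    | cons x t ih =>
      simp only [List.foldl_cons]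
      rw [ih (max a x)]
      rw [max_assoc]

-- A's running max over nonempty flare records = B's peak expression
lemma pv_peak_eq (l : List (List (String × Int))) (h : ∀ f ∈ l, f.isEmpty = false) :
    l.foldl (fun peak flares =>
        match PySem.List.pyGet? flares 0 with
        | some hf => if hf.2 > peak then hf.2 else peak
        | none => peak) 0
      = (PySem.List.max?
          (((l.filter (fun f => !f.isEmpty)).map (fun f => ((PySem.List.pyGet? f 0).map Prod.snd).getD 0)) ++ [(0 : Int)])
          (fun y => y)).getD 0 := by
  have hfil : l.filter (fun f => !f.isEmpty) = l :=
    List.filter_eq_self.mpr (fun f hf => by simp [h f hf])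
  rw [hfil, pv_max_append_zero, List.foldl_map]
  apply PySem.List.foldl_congr_mem
  intro acc f hf
  match f, h f hf with
  | a :: t, _ =>
    simp only [PySem.List.pyGet?, PySem.List.pyIdx?]
    norm_num
    rcases le_or_gt a.2 acc with hle | hlt
    · rw [if_neg (by omega), max_eq_left hle]
    · rw [if_pos (by omega), max_eq_right hlt.le]

theorem pv_main (s : List (String × Int)) (fl : List (String × List (List (String × Int))))
    (hPre : Pre_time_series_analysis s fl) :
    time_series_analysis s fl = time_series_analysis_alt s fl := by
  obtain ⟨hnd, hok⟩ := hPre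
  unfold time_series_analysis time_series_analysis_alt
  dsimp only
  congr 1
  apply PySem.List.foldl_congr_mem
  intro d day hday
  have hget :
      (fl.foldl (fun d p =>
        d.insert p.1 ((PySem.List.max?
          (((p.2.filter (fun f => !f.isEmpty)).map (fun f => ((PySem.List.pyGet? f 0).map Prod.snd).getD 0)) ++ [(0 : Int)])
          (fun y => y)).getD 0)) PySem.Dict.empty).get? day.1 =
      (pvFlares? fl day.1).map (fun fd => (PySem.List.max?
          (((fd.filter (fun f => !f.isEmpty)).map (fun f => ((PySem.List.pyGet? f 0).map Prod.snd).getD 0)) ++ [(0 : Int)])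
          (fun y => y)).getD 0) := by
    rw [pv_get?_foldl_insert (fun p => p.1)
      (fun p => (PySem.List.max?
          (((p.2.filter (fun f => !f.isEmpty)).map (fun f => ((PySem.List.pyGet? f 0).map Prod.snd).getD 0)) ++ [(0 : Int)])
          (fun y => y)).getD 0) fl _ day.1]
    rw [pv_find?_reverse_nodup fl day.1 hnd]
    unfold pvFlares?
    cases fl.find? (fun p => p.1 == day.1) <;> simp
  rw [hget]
  cases hfd : pvFlares? fl day.1 with
  | none => simp
  | some fd =>
    simp only [Option.map_some]
    have hall := hok day hday
    rw [hfd] at hall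
    simp only [Option.getD_some] at hall
    have hne : ∀ f ∈ fd, f.isEmpty = false := by
      intro f hf
      have := List.all_eq_true.mp hall f hf
      simpa using this
    rw [pv_peak_eq fd hne]

-- ===== VERDICT (by name: the statement is the Claim_ definition above) =====
theorem time_series_analysis_spec : Claim_equal_time_series_analysis := by
  intro s fl _ hPre
  unfold Spec_time_series_analysis
  exact pv_main s fl hPre

def time_series_analysis_raises : Claim_raises_time_series_analysis := by
  unfold Claim_raises_time_series_analysis
  constructor
  · intro s fl _ ⟨day, hmem, hbad⟩ ⟨_, hok⟩
    exact hbad (hok day hmem)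
  · exact ⟨by decide, ⟨("a",1), by decide, by decide⟩, by decide⟩
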